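-- pv_equiv track=rewrite | github.com/nekoshet/letter_boxed_solver | solve_letter_boxed.py | create_letter_connections
-- ===== SOURCE A (Python) =====
-- def create_letter_connections(spec):
--     connections = {}
--     for i in range(len(spec)):
--         connected_groups = [spec[j] for j in range(len(spec)) if j != i]
--         connected_letters = sum(connected_groups, [])
--         curr_group = spec[i]
--         for letter in curr_group:
--             connections[letter] = connected_letters
--     connections['['] = sum(spec, [])
--     return connections
-- ===== SOURCE B (Python) =====
-- def create_letter_connections(spec):
--     full = sum(spec, [])
--     connections = {}
--     start = 0
--     for group in spec:
--         connected = full[:start] + full[start + len(group):]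
--         for letter in group:
--             connections[letter] = connected
--         start += len(group)
--     connections['['] = full
--     return connections
-- ===== Notes on version B (the rewrite author's own statement) =====
-- stated objective: simpler
-- what changed: B concatenates all groups once and derives each group's 'other letters' list by slicing its contiguous segment out of that single concatenation (running offset), instead of re-filtering and re-summing all other groups for every group.
import Mathlib
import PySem

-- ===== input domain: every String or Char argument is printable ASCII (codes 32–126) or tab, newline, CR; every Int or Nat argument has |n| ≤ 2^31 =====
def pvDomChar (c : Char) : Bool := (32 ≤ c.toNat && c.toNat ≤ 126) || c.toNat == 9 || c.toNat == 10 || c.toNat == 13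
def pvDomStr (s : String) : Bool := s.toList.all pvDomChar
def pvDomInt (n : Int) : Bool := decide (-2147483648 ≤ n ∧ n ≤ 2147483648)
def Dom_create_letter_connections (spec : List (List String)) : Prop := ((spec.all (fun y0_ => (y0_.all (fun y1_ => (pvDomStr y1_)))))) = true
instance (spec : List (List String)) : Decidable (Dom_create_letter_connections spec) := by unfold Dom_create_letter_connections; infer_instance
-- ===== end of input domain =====

-- B builds the concatenation of all groups once and slices each group's segment out of it
-- (running offset), instead of re-filtering and re-summing the other groups per group.
-- ===== PORT A =====
def create_letter_connections (spec : List (List String)) : List (String × List String) :=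
  let n : Int := spec.length
  let conns := (PySem.List.pyRange 0 n 1).foldl (fun conns i =>
    let connected_groups := ((PySem.List.pyRange 0 n 1).filter (fun j => decide (j ≠ i))).map
      (fun j => PySem.List.pyGetD spec j [])
    let connected_letters := connected_groups.foldl (fun acc g => acc ++ g) []
    let curr_group := PySem.List.pyGetD spec i []
    curr_group.foldl (fun c letter => c.insert letter connected_letters) conns)
    (PySem.Dict.empty : PySem.Dict String (List String))
  (conns.insert "[" (spec.foldl (fun acc g => acc ++ g) [])).items

-- ===== PORT B =====
def create_letter_connections_alt (spec : List (List String)) : List (String × List String) :=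
  let full := spec.foldl (fun acc g => acc ++ g) []
  let st := spec.foldl
    (fun (p : PySem.Dict String (List String) × Int) group =>
      let connected := PySem.List.slice full none (some p.2) ++
                       PySem.List.slice full (some (p.2 + (group.length : Int))) none
      (group.foldl (fun c letter => c.insert letter connected) p.1,
       p.2 + (group.length : Int)))
    ((PySem.Dict.empty : PySem.Dict String (List String)), 0)
  (st.1.insert "[" full).items

-- ===== PRECONDITION & SPEC =====
def Spec_create_letter_connections (spec : List (List String)) (out : List (String × List String)) : Prop := out = create_letter_connections_alt spec
instance (spec : List (List String)) (out : List (String × List String)) : Decidable (Spec_create_letter_connections spec out) := by unfold Spec_create_letter_connections; infer_instance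

-- ===== CLAIM (what is proved, stated in full; the proofs are below) =====
def Claim_equal_create_letter_connections : Prop := ∀ (spec : List (List String)), Dom_create_letter_connections spec → Spec_create_letter_connections spec (create_letter_connections spec)

-- ===== LEMMAS AND PROOFS =====

-- ===== VERDICT (by name: the statement is the Claim_ definition above) =====
-- prefix of pyRange maps to a take
lemma map_getD_range_take (spec : List (List String)) (i : Nat) (h : i ≤ spec.length) :
    (PySem.List.pyRange 0 (i : Int) 1).map (fun j => PySem.List.pyGetD spec j []) =
      spec.take i := by
  have hc : ∀ j ∈ PySem.List.pyRange 0 (i : Int) 1,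
      PySem.List.pyGetD spec j [] = PySem.List.pyGetD (spec.take i) j [] := by
    intro j hj
    rw [PySem.List.mem_pyRange_one] at hj
    obtain ⟨h0, h1⟩ := hj
    rw [PySem.List.pyGetD_eq_getElem spec [] h0   (by omega),
        PySem.List.pyGetD_eq_getElem (spec.take i) [] h0
          (by simp [List.length_take]; omega)]
    simp [List.getElem_take]
  rw [List.map_congr_left hc]
  have hl : ((spec.take i).length : Int) = (i : Int) := by
    simp [List.length_take]; omega
  rw [← hl]
  exact PySem.List.map_pyGetD_pyRange_zero (spec.take i) []

lemma filter_map_eraseIdx (spec : List (List String)) (i : Nat) (h : i < spec.length) :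
    ((PySem.List.pyRange 0 (spec.length : Int) 1).filter
        (fun j => decide (j ≠ (i : Int)))).map (fun j => PySem.List.pyGetD spec j []) =
      spec.take i ++ spec.drop (i + 1) := by
  have hsplit : PySem.List.pyRange 0 (spec.length : Int) 1 =
      PySem.List.pyRange 0 (i : Int) 1 ++ PySem.List.pyRange (i : Int) (spec.length : Int) 1 :=
    PySem.List.pyRange_one_append 0 i spec.length (by positivity) (by exact_mod_cast h.le)
  have hcons : PySem.List.pyRange (i : Int) (spec.length : Int) 1 =
      (i : Int) :: PySem.List.pyRange ((i : Int) + 1) (spec.length : Int) 1 :=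
    PySem.List.pyRange_one_cons (by exact_mod_cast h)
  rw [hsplit, hcons, List.filter_append]
  have h1 : (PySem.List.pyRange 0 (i : Int) 1).filter (fun j => decide (j ≠ (i : Int))) =
      PySem.List.pyRange 0 (i : Int) 1 := by
    apply List.filter_eq_self.mpr
    intro j hj
    rw [PySem.List.mem_pyRange_one] at hj
    simp; omega
  have h2 : ((i : Int) :: PySem.List.pyRange ((i : Int) + 1) (spec.length : Int) 1).filter
      (fun j => decide (j ≠ (i : Int))) =
      PySem.List.pyRange ((i : Int) + 1) (spec.length : Int) 1 := by
    rw [List.filter_cons]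
    simp only [ne_eq, not_true_eq_false, decide_false, if_neg Bool.false_ne_true]
    apply List.filter_eq_self.mpr
    intro j hj
    rw [PySem.List.mem_pyRange_one] at hj
    simp; omega
  rw [h1, h2, List.map_append, map_getD_range_take spec i h.le]
  have h3 := PySem.List.map_pyGetD_pyRange spec [] (a := (i : Int) + 1) (by positivity)
  rw [PySem.List.len] at h3
  rw [h3]
  norm_num

lemma connected_eq (pre rest' : List (List String)) (g : List String) :
    ((((PySem.List.pyRange 0 (((pre ++ g :: rest').length : Nat) : Int) 1).filter
          (fun j => decide (j ≠ ((pre.length : Nat) : Int)))).map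
        (fun j => PySem.List.pyGetD (pre ++ g :: rest') j [])).foldl
      (fun acc g => acc ++ g) []) =
    PySem.List.slice (pre ++ g :: rest').flatten none (some ((pre.flatten.length : Nat) : Int)) ++
      PySem.List.slice (pre ++ g :: rest').flatten
        (some (((pre.flatten.length : Nat) : Int) + ((g.length : Nat) : Int))) none := by
  rw [filter_map_eraseIdx (pre ++ g :: rest') pre.length (by simp)]
  have hdrop : (pre ++ g :: rest').drop (pre.length + 1) = rest' := by
    have : pre ++ g :: rest' = (pre ++ [g]) ++ rest' := by simp
    rw [this]
    have h1 : pre.length + 1 = (pre ++ [g]).length := by simp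
    rw [h1, List.drop_left]
  rw [List.take_left, hdrop, PySem.List.foldl_append_eq_flatten, List.nil_append,
      List.flatten_append]
  have hfl : (pre ++ g :: rest').flatten = (pre.flatten ++ g) ++ rest'.flatten := by
    simp [List.flatten_append]
  have hcast : ((pre.flatten.length : Nat) : Int) + ((g.length : Nat) : Int) =
      (((pre.flatten ++ g).length : Nat) : Int) := by push_cast [List.length_append]; ring
  rw [hcast, PySem.List.slice_to_natCast, PySem.List.slice_from_natCast, hfl]
  rw [List.drop_left]
  have : (pre.flatten ++ g) ++ rest'.flatten = pre.flatten ++ (g ++ rest'.flatten) := by simp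
  rw [this, List.take_left]

lemma main_loop (spec : List (List String)) :
    ∀ (rest pre : List (List String)) (conns : PySem.Dict String (List String)),
      spec = pre ++ rest →
      (PySem.List.pyRange (pre.length : Int) (spec.length : Int) 1).foldl
        (fun conns i =>
          let connected_groups := ((PySem.List.pyRange 0 (spec.length : Int) 1).filter
              (fun j => decide (j ≠ i))).map (fun j => PySem.List.pyGetD spec j [])
          let connected_letters := connected_groups.foldl (fun acc g => acc ++ g) []
          let curr_group := PySem.List.pyGetD spec i []
          curr_group.foldl (fun c letter => c.insert letter connected_letters) conns) conns =
      (rest.foldl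
        (fun (p : PySem.Dict String (List String) × Int) group =>
          let connected := PySem.List.slice spec.flatten none (some p.2) ++
                           PySem.List.slice spec.flatten (some (p.2 + (group.length : Int))) none
          (group.foldl (fun c letter => c.insert letter connected) p.1,
           p.2 + (group.length : Int)))
        (conns, (pre.flatten.length : Int))).1 := by
  intro rest
  induction rest with
  | nil =>
    intro pre conns hspec
    have : (spec.length : Int) ≤ (pre.length : Int) := by
      subst hspec; simp
    rw [PySem.List.pyRange_one_eq_nil this]
    simp
  | cons g rest' ih =>
    intro pre conns hspec
    have hlt : (pre.length : Int) < (spec.length : Int) := by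
      subst hspec; push_cast [List.length_append, List.length_cons]; omega
    rw [PySem.List.pyRange_one_cons hlt, List.foldl_cons, List.foldl_cons]
    have hgroup : PySem.List.pyGetD spec ((pre.length : Nat) : Int) [] = g := by
      rw [PySem.List.pyGetD_eq_getElem spec [] (by positivity) hlt]
      subst hspec
      simp [List.getElem_append_right, Int.toNat_natCast]
    have hconn := connected_eq pre rest' g
    rw [← hspec] at hconn
    have hcast1 : ((pre.length : Nat) : Int) + 1 = (((pre ++ [g]).length : Nat) : Int) := by
      push_cast [List.length_append, List.length_cons, List.length_nil]; ring
    have hstart : ((pre.flatten.length : Nat) : Int) + ((g.length : Nat) : Int) =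
        (((pre ++ [g]).flatten.length : Nat) : Int) := by
      push_cast [List.flatten_append, List.length_append]; simp
    simp only [hgroup, hconn]
    rw [hcast1]
    have := ih (pre ++ [g]) (g.foldl (fun c letter => c.insert letter
      (PySem.List.slice spec.flatten none (some ((pre.flatten.length : Nat) : Int)) ++
        PySem.List.slice spec.flatten
          (some (((pre.flatten.length : Nat) : Int) + ((g.length : Nat) : Int))) none)) conns)
      (by rw [hspec]; simp)
    rw [this, hstart]

-- ===== VERDICT =====
theorem create_letter_connections_spec : Claim_equal_create_letter_connections := by
  intro spec _
  unfold Spec_create_letter_connections create_letter_connections create_letter_connections_alt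
  have := main_loop spec spec [] PySem.Dict.empty rfl
  simp only [List.length_nil, Nat.cast_zero, List.flatten_nil] at this
  simp only [PySem.List.foldl_append_eq_flatten, List.nil_append] at this ⊢
  rw [this]
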